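-- pv_equiv track=rewrite | github.com/sskhan67/GPGPU-Programming- | QODE/qode/fermion_field/occ_strings.py | _make_occ_strings
-- ===== SOURCE A (Python) =====
-- from copy import copy
--
-- def _make_occ_strings(occ_string,n_elec,preface=[]):
-- 	"""\
-- 	This is a workhorse function, not likely to be of use to a caller outside of this file.
--
-- 	Given an input occ_string (boolean list of occupancies), this will add n_elec more electrons
-- 	to only the empty slots, in all possible configruations in those empty slots.  The results
-- 	are returned as a list with the preface occupation string pre-pended to it.  (The preface is
-- 	needed for the recursive manner in which this function does its work, and is not meant to
-- 	be specified from the "outside.")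
-- 	"""
-- 	the_list = []
-- 	if n_elec==0:
-- 		the_list += [preface+occ_string]
-- 	else:
-- 		n_elec -= 1
-- 		for i in range(len(occ_string)):
-- 			if not occ_string[i]:
-- 				occ_string_temp = copy(occ_string)
-- 				occ_string_temp[i] = True
-- 				the_list += _make_occ_strings(occ_string_temp[i+1:],n_elec,preface+occ_string_temp[:i+1])
-- 	return the_list
-- ===== SOURCE B (Python) =====
-- from itertools import combinations
--
-- def _make_occ_strings(occ_string, n_elec, preface=[]):
--     """Flat re-implementation: choose n_elec of the empty slot indices with
--     itertools.combinations (index-lexicographic order, matching the recursive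
--     original) and fill each chosen slot with True."""
--     if n_elec < 0:
--         return []
--     empty = [i for i in range(len(occ_string)) if not occ_string[i]]
--     if n_elec > len(empty):
--         return []
--     the_list = []
--     for chosen in combinations(empty, n_elec):
--         filled = list(occ_string)
--         for j in chosen:
--             filled[j] = True
--         the_list.append(preface + filled)
--     return the_list
-- ===== Notes on version B (the rewrite author's own statement) =====
-- stated objective: simpler
-- what changed: Replaces the slot-by-slot recursive backtracking (which copies and slices the occupation string at every level) with a single flat loop over itertools.combinations of the empty-slot indices, filling each chosen combination into one copy of the input.
import Mathlib
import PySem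

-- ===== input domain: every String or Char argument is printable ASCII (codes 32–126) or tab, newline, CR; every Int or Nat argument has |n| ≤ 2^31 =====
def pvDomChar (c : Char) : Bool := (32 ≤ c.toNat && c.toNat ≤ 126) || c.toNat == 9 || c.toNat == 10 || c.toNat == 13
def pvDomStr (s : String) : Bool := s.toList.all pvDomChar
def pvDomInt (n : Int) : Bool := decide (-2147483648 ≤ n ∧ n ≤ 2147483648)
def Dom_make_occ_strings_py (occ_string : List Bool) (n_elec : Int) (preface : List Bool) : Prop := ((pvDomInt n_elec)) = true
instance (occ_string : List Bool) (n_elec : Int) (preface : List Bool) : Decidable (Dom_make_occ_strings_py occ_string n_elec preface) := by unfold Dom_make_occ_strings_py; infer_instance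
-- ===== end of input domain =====

-- B replaces A's recursive slot-by-slot backtracking by one flat loop over combinations
-- of the empty-slot indices (objective: simpler). Neither version mutates its arguments.

-- ===== PORT A =====
-- A's inner 'for i in range(len(occ_string))' loop is the recursion mos_loop over the index
-- list; the dite guard 'i < occ_string.length' only makes indexing total (it always holds for
-- indices drawn from range(len)); slices tmp[i+1:] / tmp[:i+1] are List.drop / List.take,
-- exact here since 0 ≤ i+1 ≤ length.
mutual
def make_occ_strings_py (occ_string : List Bool) (n_elec : Int) (preface : List Bool) : List (List Bool) :=
  if n_elec = 0 then [preface ++ occ_string]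
  else mos_loop occ_string (n_elec - 1) preface (List.range occ_string.length) []
termination_by (occ_string.length, occ_string.length + 1)

def mos_loop (occ_string : List Bool) (n_elec : Int) (preface : List Bool) (idxs : List Nat) (acc : List (List Bool)) : List (List Bool) :=
  match idxs with
  | [] => acc
  | i :: rest =>
    if h : i < occ_string.length then
      if occ_string[i] = false then
        let tmp := occ_string.set i true
        mos_loop occ_string n_elec preface rest
          (acc ++ make_occ_strings_py (tmp.drop (i+1)) n_elec (preface ++ tmp.take (i+1)))
      else mos_loop occ_string n_elec preface rest acc
    else mos_loop occ_string n_elec preface rest acc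
termination_by (occ_string.length, idxs.length)
decreasing_by
  all_goals simp only [List.length_drop, List.length_set, List.length_cons]
  all_goals first
    | exact Prod.Lex.left _ _ (by omega)
    | exact Prod.Lex.right _ (by omega)
end

-- ===== PORT B =====
-- Source B: empty-slot indices once, then itertools.combinations (PySem.List.combinations,
-- CPython's index-lexicographic order) and one fill loop per combination.
def make_occ_strings_py_alt (occ_string : List Bool) (n_elec : Int) (preface : List Bool) : List (List Bool) :=
  if n_elec < 0 then []
  else
    let empty := (List.range occ_string.length).filter (fun i => occ_string.getD i false = false)
    if (empty.length : Int) < n_elec then []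
    else
      (PySem.List.combinations empty n_elec.toNat).map (fun chosen =>
        preface ++ chosen.foldl (fun filled j => filled.set j true) occ_string)

-- ===== PRECONDITION & SPEC =====
def Spec_make_occ_strings_py (occ_string : List Bool) (n_elec : Int) (preface : List Bool) (out : List (List Bool)) : Prop := out = make_occ_strings_py_alt occ_string n_elec preface
instance (occ_string : List Bool) (n_elec : Int) (preface : List Bool) (out : List (List Bool)) : Decidable (Spec_make_occ_strings_py occ_string n_elec preface out) := by unfold Spec_make_occ_strings_py; infer_instance

-- ===== CLAIM (what is proved, stated in full; the proofs are below) =====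
def Claim_equal_make_occ_strings_py : Prop := ∀ (occ_string : List Bool) (n_elec : Int) (preface : List Bool), Dom_make_occ_strings_py occ_string n_elec preface → Spec_make_occ_strings_py occ_string n_elec preface (make_occ_strings_py occ_string n_elec preface)

-- ===== LEMMAS AND PROOFS =====

-- Common structural-recursion description of both programs (for n_elec.toNat = k, n_elec ≥ 0).
def mosG : List Bool → Nat → List Bool → List (List Bool)
  | occ, 0, pre => [pre ++ occ]
  | [], _+1, _ => []
  | b :: occ, k+1, pre =>
      (if b = false then mosG occ k (pre ++ [true]) else []) ++ mosG occ (k+1) (pre ++ [b])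

-- step equations for the loop
theorem mos_loop_nil (occ : List Bool) (n : Int) (pre : List Bool) (acc : List (List Bool)) :
    mos_loop occ n pre [] acc = acc := by
  rw [mos_loop]

theorem mos_loop_cons_fill (occ : List Bool) (n : Int) (pre : List Bool) (i : Nat) (rest : List Nat)
    (acc : List (List Bool)) (h : i < occ.length) (hb : occ[i] = false) :
    mos_loop occ n pre (i :: rest) acc =
      mos_loop occ n pre rest
        (acc ++ make_occ_strings_py ((occ.set i true).drop (i+1)) n (pre ++ (occ.set i true).take (i+1))) := by
  rw [mos_loop]; rw [dif_pos h, if_pos hb]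

theorem mos_loop_cons_skip (occ : List Bool) (n : Int) (pre : List Bool) (i : Nat) (rest : List Nat)
    (acc : List (List Bool)) (h : i < occ.length) (hb : ¬ occ[i] = false) :
    mos_loop occ n pre (i :: rest) acc = mos_loop occ n pre rest acc := by
  rw [mos_loop]; rw [dif_pos h, if_neg hb]

-- the accumulator factors out of the loop
theorem mos_loop_acc (occ : List Bool) (n : Int) (pre : List Bool) (idxs : List Nat) (acc : List (List Bool)) :
    mos_loop occ n pre idxs acc = acc ++ mos_loop occ n pre idxs [] := by
  induction idxs generalizing acc with
  | nil => simp [mos_loop_nil]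
  | cons i rest ih =>
    by_cases h : i < occ.length
    · by_cases hb : occ[i] = false
      · rw [mos_loop_cons_fill occ n pre i rest acc h hb,
            mos_loop_cons_fill occ n pre i rest [] h hb, ih, ih (acc := [] ++ _)]
        simp
      · rw [mos_loop_cons_skip occ n pre i rest acc h hb,
            mos_loop_cons_skip occ n pre i rest [] h hb, ih]
    · rw [mos_loop]; rw [dif_neg h]
      conv_rhs => rw [mos_loop]; rw [dif_neg h]
      rw [ih]

-- shifting all indices by one peels the head element into the preface
theorem mos_loop_shift (b : Bool) (occ : List Bool) (n : Int) (pre : List Bool) (idxs : List Nat) (acc : List (List Bool)) :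
    mos_loop (b :: occ) n pre (idxs.map Nat.succ) acc = mos_loop occ n (pre ++ [b]) idxs acc := by
  induction idxs generalizing acc with
  | nil => simp [mos_loop_nil]
  | cons i rest ih =>
    by_cases h : i < occ.length
    · have h' : i.succ < (b :: occ).length := by simpa using h
      by_cases hb : occ[i] = false
      · have hb' : (b :: occ)[i.succ] = false := by simpa using hb
        have e1 : ((b :: occ).set i.succ true).drop (i.succ+1) = (occ.set i true).drop (i+1) := by
          simp [List.set_cons_succ]
        have e2 : pre ++ ((b :: occ).set i.succ true).take (i.succ+1)
            = (pre ++ [b]) ++ (occ.set i true).take (i+1) := by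
          simp [List.set_cons_succ]
        rw [List.map_cons, mos_loop_cons_fill _ n pre _ _ acc h' hb', e1, e2, ih,
            mos_loop_cons_fill occ n (pre ++ [b]) i rest acc h hb]
      · have hb' : ¬ ((b :: occ)[i.succ] = false) := by simpa using hb
        rw [List.map_cons, mos_loop_cons_skip _ n pre _ _ acc h' hb',
            mos_loop_cons_skip occ n (pre ++ [b]) i rest acc h hb, ih]
    · have h' : ¬ (i.succ < (b :: occ).length) := by simpa using h
      rw [List.map_cons, mos_loop]; rw [dif_neg h']
      conv_rhs => rw [mos_loop]; rw [dif_neg h]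
      exact ih acc

-- unfolding of the outer function for nonzero n
theorem mosA_unfold (occ : List Bool) (n : Int) (pre : List Bool) (hn : n ≠ 0) :
    make_occ_strings_py occ n pre = mos_loop occ (n-1) pre (List.range occ.length) [] := by
  rw [make_occ_strings_py]; rw [if_neg hn]

-- A's recursion, expressed on the head of the list
theorem mosA_cons (b : Bool) (occ : List Bool) (n : Int) (pre : List Bool) (hn : n ≠ 0) :
    make_occ_strings_py (b :: occ) n pre =
      (if b = false then make_occ_strings_py occ (n-1) (pre ++ [true]) else []) ++
        make_occ_strings_py occ n (pre ++ [b]) := by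
  rw [mosA_unfold _ _ _ hn]
  have hr : List.range (b :: occ).length = 0 :: (List.range occ.length).map Nat.succ := by
    simp [List.range_succ_eq_map]
  rw [hr]
  have h0 : 0 < (b :: occ).length := by simp
  by_cases hb : b = false
  · have hb' : (b :: occ)[0] = false := by simpa using hb
    have e1 : ((b :: occ).set 0 true).drop 1 = occ := by simp [List.set]
    have e2 : pre ++ ((b :: occ).set 0 true).take 1 = pre ++ [true] := by simp [List.set]
    rw [mos_loop_cons_fill _ _ _ _ _ _ h0 hb', e1, e2, mos_loop_shift, mos_loop_acc,
        ← mosA_unfold occ n (pre ++ [b]) hn]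
    simp [hb]
  · have hb' : ¬ ((b :: occ)[0] = false) := by simpa using hb
    rw [mos_loop_cons_skip _ _ _ _ _ _ h0 hb', mos_loop_shift,
        ← mosA_unfold occ n (pre ++ [b]) hn]
    simp [hb]

-- A equals the structural description (and is [] for negative n)
theorem mosA_eq_G (occ : List Bool) (n : Int) (pre : List Bool) :
    make_occ_strings_py occ n pre = if n < 0 then [] else mosG occ n.toNat pre := by
  induction occ generalizing n pre with
  | nil =>
    by_cases hn : n = 0
    · subst hn; rw [make_occ_strings_py]; simp [mosG]
    · rw [mosA_unfold _ _ _ hn]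
      simp only [List.length_nil, List.range_zero, mos_loop_nil]
      rcases Int.lt_or_lt_of_ne hn with h | h
      · rw [if_pos h]
      · rw [if_neg (by omega)]
        obtain ⟨k, hk⟩ : ∃ k, n.toNat = k + 1 := ⟨n.toNat - 1, by omega⟩
        rw [hk]; rfl
  | cons b occ ih =>
    by_cases hn : n = 0
    · subst hn; rw [make_occ_strings_py]; simp [mosG]
    · rw [mosA_cons b occ n pre hn, ih, ih]
      rcases Int.lt_or_lt_of_ne hn with h | h
      · simp [h, show n - 1 < 0 by omega]
      · have h1 : ¬ n < 0 := by omega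
        have h2 : ¬ n - 1 < 0 := by omega
        obtain ⟨k, hk⟩ : ∃ k, n.toNat = k + 1 := ⟨n.toNat - 1, by omega⟩
        have hk' : (n - 1).toNat = k := by omega
        simp only [if_neg h1, if_neg h2, hk, hk']
        conv_rhs => rw [mosG]

-- filling shifted indices leaves the head alone
theorem fold_set_shift (b : Bool) (occ : List Bool) (c : List Nat) :
    (c.map Nat.succ).foldl (fun filled j => filled.set j true) (b :: occ)
      = b :: c.foldl (fun filled j => filled.set j true) occ := by
  induction c generalizing occ with
  | nil => rfl
  | cons i rest ih => simp only [List.map_cons, List.foldl_cons, List.set_cons_succ]; exact ih _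

-- B's computation equals the structural description
theorem mosB_eq_G (occ : List Bool) (k : Nat) (pre : List Bool) :
    (PySem.List.combinations ((List.range occ.length).filter (fun i => occ.getD i false = false)) k).map
        (fun chosen => pre ++ chosen.foldl (fun filled j => filled.set j true) occ)
      = mosG occ k pre := by
  induction occ generalizing k pre with
  | nil =>
    cases k with
    | zero => simp [PySem.List.combinations_zero, mosG]
    | succ k => simp [PySem.List.combinations_nil_succ, mosG]
  | cons b occ ih =>
    have hr : (List.range (b :: occ).length).filter (fun i => (b :: occ).getD i false = false)
        = (if b = false then [0] else []) ++
            (((List.range occ.length).filter (fun i => occ.getD i false = false)).map Nat.succ) := by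
      rw [List.length_cons, List.range_succ_eq_map, List.filter_cons, List.filter_map]
      by_cases hb : b = false <;> simp [hb, Function.comp_def]
    cases k with
    | zero => simp [PySem.List.combinations_zero, mosG]
    | succ k =>
      rw [hr, mosG]
      by_cases hb : b = false
      · subst hb
        rw [if_pos rfl, if_pos rfl, List.singleton_append, PySem.List.combinations_cons_succ]
        simp only [PySem.List.combinations_map, List.map_append, List.map_map]
        congr 1
        · rw [← ih k (pre ++ [true])]
          apply List.map_congr_left; intro c _
          simp [Function.comp_def, fold_set_shift, List.set_cons_zero]
        · rw [← ih (k+1) (pre ++ [false])]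
          apply List.map_congr_left; intro c _
          simp [fold_set_shift]
      · have hb' : b = true := by cases b <;> simp_all
        subst hb'
        rw [if_neg (by simp), if_neg (by simp), List.nil_append, List.nil_append,
          PySem.List.combinations_map]
        simp only [List.map_map]
        rw [← ih (k+1) (pre ++ [true])]
        apply List.map_congr_left; intro c _
        simp [fold_set_shift]

-- ===== VERDICT (by name: the statement is the Claim_ definition above) =====
theorem make_occ_strings_py_spec : Claim_equal_make_occ_strings_py := by
  intro occ n pre _
  unfold Spec_make_occ_strings_py
  simp only [make_occ_strings_py_alt]
  rw [mosA_eq_G]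
  by_cases h : n < 0
  · rw [if_pos h, if_pos h]
  · rw [if_neg h, if_neg h, ← mosB_eq_G occ n.toNat pre]
    by_cases hlt : ((((List.range occ.length).filter (fun i => occ.getD i false = false)).length : Int) < n)
    · rw [if_pos hlt]
      have hc : ((List.range occ.length).filter (fun i => occ.getD i false = false)).length < n.toNat := by
        omega
      rw [PySem.List.combinations_eq_nil_of_length_lt _ hc, List.map_nil]
    · rw [if_neg hlt]
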